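-- pv_equiv track=rewrite | github.com/augustozarate/android-opsec-hardening | opsec/scripts/analysis/dns_review_tool_enhanced.py | categorize_denylist
-- ===== SOURCE A (Python) =====
-- def categorize_denylist(domain, count):
--     """Subcategorize denylist entries for better reporting - UPDATED"""
--     # First check if it is Mozilla telemetry
--     if "telemetry.mozilla.org" in domain or "ads.mozilla.org" in domain:
--         return "deny_telemetry", domain, count
--
--     # Then the other categories
--     if any(p in domain for p in ["googleapis.com", "firebase", "crashlytics", "app-measurement", "geller-pa", "locationhistory-pa"]):
--         if "-pa.googleapis.com" in domain and "playstoregatewayadapter" not in domain: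
--             return "deny_telemetry", domain, count
--         elif "firebase" in domain or "crashlytics" in domain:
--             return "deny_telemetry", domain, count
--         else:
--             return "deny_telemetry", domain, count
--     elif any(p in domain for p in ["facebook", "instagram"]):
--         # Exclude core services from Facebook
--         if any(core in domain for core in ["graph.facebook.com", "web.facebook.com", "i.instagram.com"]):
--             return "social_core", domain, count
--         return "deny_meta", domain, count
--     elif "samsung" in domain:
--         # Some Samsung domains are telemetry, others are core services
--         if any(telemetry in domain for telemetry in ["samsungdm.com", "dls.di.atlas", "dc.di.atlas"]):
--             return "deny_oem", domain, count
--         return "samsung_services", domain, count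
--     elif any(p in domain for p in ["doubleclick", "ads.", "analytics", "measurement", "taboola", "googleads", "googleadservices"]):
--         return "deny_ads", domain, count
--     else:
--         return "deny_other", domain, count
-- ===== SOURCE B (Python) =====
-- # Flat priority table + single min-scan: every (priority, category, required
-- # substrings) entry is tested independently (no cascade, no exception sub-loops);
-- # the matching entry with the smallest priority wins, default deny_other.
-- ENTRIES = [
--     (0, "deny_telemetry", ("telemetry.mozilla.org",)),
--     (0, "deny_telemetry", ("ads.mozilla.org",)),
--     (1, "deny_telemetry", ("googleapis.com",)),
--     (1, "deny_telemetry", ("firebase",)),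
--     (1, "deny_telemetry", ("crashlytics",)),
--     (1, "deny_telemetry", ("app-measurement",)),
--     (1, "deny_telemetry", ("geller-pa",)),
--     (1, "deny_telemetry", ("locationhistory-pa",)),
--     (2, "social_core", ("graph.facebook.com",)),
--     (2, "social_core", ("web.facebook.com",)),
--     (2, "social_core", ("i.instagram.com",)),
--     (3, "deny_meta", ("facebook",)),
--     (3, "deny_meta", ("instagram",)),
--     (4, "deny_oem", ("samsungdm.com",)),
--     (4, "deny_oem", ("samsung", "dls.di.atlas")),
--     (4, "deny_oem", ("samsung", "dc.di.atlas")),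
--     (5, "samsung_services", ("samsung",)),
--     (6, "deny_ads", ("doubleclick",)),
--     (6, "deny_ads", ("ads.",)),
--     (6, "deny_ads", ("analytics",)),
--     (6, "deny_ads", ("measurement",)),
--     (6, "deny_ads", ("taboola",)),
--     (6, "deny_ads", ("googleads",)),
--     (6, "deny_ads", ("googleadservices",)),
-- ]
--
-- def categorize_denylist(domain, count):
--     best_prio = None
--     best_cat = "deny_other"
--     for prio, cat, pats in ENTRIES:
--         if all(p in domain for p in pats) and (best_prio is None or prio < best_prio):
--             best_prio, best_cat = prio, cat
--     return best_cat, domain, count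
-- ===== Notes on version B (the rewrite author's own statement) =====
-- stated objective: alternative
-- what changed: Replaces A's ordered if/elif cascade with nested exception checks by a flat table of independent (priority, category, required-substrings) entries scanned once, returning the matching entry's category of minimum priority (exceptions become conjunctive higher-priority entries); the scan order is irrelevant, only the minimum matters.
import Mathlib
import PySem

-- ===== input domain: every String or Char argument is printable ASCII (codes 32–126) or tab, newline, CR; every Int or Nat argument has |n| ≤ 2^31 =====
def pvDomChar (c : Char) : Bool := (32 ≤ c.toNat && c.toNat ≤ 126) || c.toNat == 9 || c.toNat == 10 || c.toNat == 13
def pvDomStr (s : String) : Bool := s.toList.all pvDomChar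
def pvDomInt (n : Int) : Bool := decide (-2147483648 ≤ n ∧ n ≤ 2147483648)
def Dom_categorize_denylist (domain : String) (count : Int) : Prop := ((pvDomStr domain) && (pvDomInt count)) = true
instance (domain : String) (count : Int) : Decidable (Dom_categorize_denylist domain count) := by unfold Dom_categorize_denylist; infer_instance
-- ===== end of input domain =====

-- B replaces A's if/elif cascade (with nested exception checks) by a flat priority
-- table scanned once for the minimum-priority matching entry; same return values.


-- ===== PORT A =====
def categorize_denylist (domain : String) (count : Int) : String × String × Int :=
  if PySem.Str.isIn "telemetry.mozilla.org" domain || PySem.Str.isIn "ads.mozilla.org" domain then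
    ("deny_telemetry", domain, count)
  else if ["googleapis.com", "firebase", "crashlytics", "app-measurement", "geller-pa",
           "locationhistory-pa"].any (fun p => PySem.Str.isIn p domain) then
    if PySem.Str.isIn "-pa.googleapis.com" domain && !PySem.Str.isIn "playstoregatewayadapter" domain then
      ("deny_telemetry", domain, count)
    else if PySem.Str.isIn "firebase" domain || PySem.Str.isIn "crashlytics" domain then
      ("deny_telemetry", domain, count)
    else
      ("deny_telemetry", domain, count)
  else if ["facebook", "instagram"].any (fun p => PySem.Str.isIn p domain) then
    if ["graph.facebook.com", "web.facebook.com", "i.instagram.com"].any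
        (fun core => PySem.Str.isIn core domain) then
      ("social_core", domain, count)
    else
      ("deny_meta", domain, count)
  else if PySem.Str.isIn "samsung" domain then
    if ["samsungdm.com", "dls.di.atlas", "dc.di.atlas"].any
        (fun telemetry => PySem.Str.isIn telemetry domain) then
      ("deny_oem", domain, count)
    else
      ("samsung_services", domain, count)
  else if ["doubleclick", "ads.", "analytics", "measurement", "taboola", "googleads",
           "googleadservices"].any (fun p => PySem.Str.isIn p domain) then
    ("deny_ads", domain, count)
  else
    ("deny_other", domain, count)

-- ===== PORT B =====
-- flat table: (priority, category, required substrings — all must occur)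
def pvEntries : List (Int × String × List String) :=
  [ (0, "deny_telemetry", ["telemetry.mozilla.org"]),
    (0, "deny_telemetry", ["ads.mozilla.org"]),
    (1, "deny_telemetry", ["googleapis.com"]),
    (1, "deny_telemetry", ["firebase"]),
    (1, "deny_telemetry", ["crashlytics"]),
    (1, "deny_telemetry", ["app-measurement"]),
    (1, "deny_telemetry", ["geller-pa"]),
    (1, "deny_telemetry", ["locationhistory-pa"]),
    (2, "social_core", ["graph.facebook.com"]),
    (2, "social_core", ["web.facebook.com"]),
    (2, "social_core", ["i.instagram.com"]),
    (3, "deny_meta", ["facebook"]),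
    (3, "deny_meta", ["instagram"]),
    (4, "deny_oem", ["samsungdm.com"]),
    (4, "deny_oem", ["samsung", "dls.di.atlas"]),
    (4, "deny_oem", ["samsung", "dc.di.atlas"]),
    (5, "samsung_services", ["samsung"]),
    (6, "deny_ads", ["doubleclick"]),
    (6, "deny_ads", ["ads."]),
    (6, "deny_ads", ["analytics"]),
    (6, "deny_ads", ["measurement"]),
    (6, "deny_ads", ["taboola"]),
    (6, "deny_ads", ["googleads"]),
    (6, "deny_ads", ["googleadservices"]) ]

-- the loop body: keep the entry if all its substrings occur and its priority
-- beats the best priority seen so far (None = nothing seen yet)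
def pvStep (domain : String) (st : Option Int × String) (e : Int × String × List String) :
    Option Int × String :=
  if e.2.2.all (fun p => PySem.Str.isIn p domain) && st.1.all (fun b => decide (e.1 < b)) then
    (some e.1, e.2.1)
  else st

def categorize_denylist_alt (domain : String) (count : Int) : String × String × Int :=
  ((pvEntries.foldl (pvStep domain) (none, "deny_other")).2, domain, count)

-- ===== PRECONDITION & SPEC =====
def Spec_categorize_denylist (domain : String) (count : Int) (out : String × String × Int) : Prop := out = categorize_denylist_alt domain count
instance (domain : String) (count : Int) (out : String × String × Int) : Decidable (Spec_categorize_denylist domain count out) := by unfold Spec_categorize_denylist; infer_instance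

-- ===== CLAIM (what is proved, stated in full; the proofs are below) =====
def Claim_equal_categorize_denylist : Prop := ∀ (domain : String) (count : Int), Dom_categorize_denylist domain count → Spec_categorize_denylist domain count (categorize_denylist domain count)

-- ===== LEMMAS AND PROOFS =====

-- substring monotonicity: if p occurs in q and q occurs in d, then p occurs in d
theorem pv_isIn_trans (p q d : List Char) (hpq : PySem.Chars.isIn p q = true)
    (hqd : PySem.Chars.isIn q d = true) : PySem.Chars.isIn p d = true := by
  rw [PySem.Chars.isIn_iff_infix] at *
  exact hpq.trans hqd

theorem pv_sub_false (p q d : List Char) (hpq : PySem.Chars.isIn p q = true)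
    (h : PySem.Chars.isIn p d = false) : PySem.Chars.isIn q d = false := by
  cases hg : PySem.Chars.isIn q d with
  | false => rfl
  | true => rw [pv_isIn_trans p q d hpq hg] at h; exact absurd h (by decide)

theorem pv_graph_false (d : List Char) (h : PySem.Chars.isIn ['f', 'a', 'c', 'e', 'b', 'o', 'o', 'k'] d = false) :
    PySem.Chars.isIn ['g', 'r', 'a', 'p', 'h', '.', 'f', 'a', 'c', 'e', 'b', 'o', 'o', 'k', '.', 'c', 'o', 'm'] d = false :=
  pv_sub_false _ _ d (by decide) h

theorem pv_web_false (d : List Char) (h : PySem.Chars.isIn ['f', 'a', 'c', 'e', 'b', 'o', 'o', 'k'] d = false) :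
    PySem.Chars.isIn ['w', 'e', 'b', '.', 'f', 'a', 'c', 'e', 'b', 'o', 'o', 'k', '.', 'c', 'o', 'm'] d = false :=
  pv_sub_false _ _ d (by decide) h

theorem pv_insta_false (d : List Char) (h : PySem.Chars.isIn ['i', 'n', 's', 't', 'a', 'g', 'r', 'a', 'm'] d = false) :
    PySem.Chars.isIn ['i', '.', 'i', 'n', 's', 't', 'a', 'g', 'r', 'a', 'm', '.', 'c', 'o', 'm'] d = false :=
  pv_sub_false _ _ d (by decide) h

theorem pv_samsungdm_false (d : List Char) (h : PySem.Chars.isIn ['s', 'a', 'm', 's', 'u', 'n', 'g'] d = false) :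
    PySem.Chars.isIn ['s', 'a', 'm', 's', 'u', 'n', 'g', 'd', 'm', '.', 'c', 'o', 'm'] d = false :=
  pv_sub_false _ _ d (by decide) h

-- group split of the table (one group per priority level)
def pvG0 : List (Int × String × List String) :=
  [ (0, "deny_telemetry", ["telemetry.mozilla.org"]), (0, "deny_telemetry", ["ads.mozilla.org"]) ]
def pvG1 : List (Int × String × List String) :=
  [ (1, "deny_telemetry", ["googleapis.com"]), (1, "deny_telemetry", ["firebase"]),
    (1, "deny_telemetry", ["crashlytics"]), (1, "deny_telemetry", ["app-measurement"]),
    (1, "deny_telemetry", ["geller-pa"]), (1, "deny_telemetry", ["locationhistory-pa"]) ]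
def pvG2 : List (Int × String × List String) :=
  [ (2, "social_core", ["graph.facebook.com"]), (2, "social_core", ["web.facebook.com"]),
    (2, "social_core", ["i.instagram.com"]) ]
def pvG3 : List (Int × String × List String) :=
  [ (3, "deny_meta", ["facebook"]), (3, "deny_meta", ["instagram"]) ]
def pvG4 : List (Int × String × List String) :=
  [ (4, "deny_oem", ["samsungdm.com"]), (4, "deny_oem", ["samsung", "dls.di.atlas"]),
    (4, "deny_oem", ["samsung", "dc.di.atlas"]) ]
def pvG5 : List (Int × String × List String) := [ (5, "samsung_services", ["samsung"]) ]
def pvG6 : List (Int × String × List String) :=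
  [ (6, "deny_ads", ["doubleclick"]), (6, "deny_ads", ["ads."]), (6, "deny_ads", ["analytics"]),
    (6, "deny_ads", ["measurement"]), (6, "deny_ads", ["taboola"]), (6, "deny_ads", ["googleads"]),
    (6, "deny_ads", ["googleadservices"]) ]

theorem fold_skip (d : String) (st : Option Int × String)
    (l : List (Int × String × List String))
    (h : ∀ e ∈ l, e.2.2.all (fun p => PySem.Str.isIn p d) = false) :
    List.foldl (pvStep d) st l = st := by
  induction l generalizing st with
  | nil => rfl
  | cons e t ih =>
    have he : pvStep d st e = st := by
      unfold pvStep; rw [h e (by simp)]; rfl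
    simp only [List.foldl, he]
    exact ih st (fun e' he' => h e' (List.mem_cons_of_mem _ he'))

theorem fold_const (d : String) (b : Int) (c : String)
    (l : List (Int × String × List String)) (h : ∀ e ∈ l, b ≤ e.1) :
    List.foldl (pvStep d) (some b, c) l = (some b, c) := by
  induction l with
  | nil => rfl
  | cons e t ih =>
    have hd : pvStep d (some b, c) e = (some b, c) := by
      unfold pvStep
      have hlt : (some b, c).1.all (fun bb => decide (e.1 < bb)) = false :=
        decide_eq_false (Int.not_lt.2 (h e (by simp)))
      rw [hlt, Bool.and_false]; rfl
    simp only [List.foldl, hd]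
    exact ih (fun e' he' => h e' (List.mem_cons_of_mem _ he'))

theorem fold_win (d : String) (p : Int) (c : String)
    (l : List (Int × String × List String))
    (hpc : ∀ e ∈ l, e.1 = p ∧ e.2.1 = c)
    (hm : ∃ e ∈ l, e.2.2.all (fun q => PySem.Str.isIn q d) = true) (s0 : String) :
    List.foldl (pvStep d) (none, s0) l = (some p, c) := by
  induction l generalizing s0 with
  | nil => exact absurd hm (by simp)
  | cons e t ih =>
    obtain ⟨h1, h2⟩ := hpc e (by simp)
    cases hx : e.2.2.all (fun q => PySem.Str.isIn q d) with
    | true =>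
      have hd : pvStep d (none, s0) e = (some p, c) := by
        unfold pvStep; rw [hx, h1, h2]; rfl
      simp only [List.foldl, hd]
      exact fold_const d p c t (fun e' he' => ((hpc e' (List.mem_cons_of_mem _ he')).1).ge)
    | false =>
      have hd : pvStep d (none, s0) e = (none, s0) := by
        unfold pvStep; rw [hx]; rfl
      simp only [List.foldl, hd]
      refine ih (fun e' he' => hpc e' (List.mem_cons_of_mem _ he')) ?_ s0
      rcases hm with ⟨e', he', hme'⟩
      rcases List.mem_cons.1 he' with rfl | ht
      · rw [hx] at hme'; exact absurd hme' (by decide)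
      · exact ⟨e', ht, hme'⟩

theorem categorize_denylist_spec : Claim_equal_categorize_denylist := by
  intro d c _
  show _ = _
  have hsplit : pvEntries = pvG0 ++ (pvG1 ++ (pvG2 ++ (pvG3 ++ (pvG4 ++ (pvG5 ++ pvG6))))) := rfl
  simp only [categorize_denylist, categorize_denylist_alt, hsplit, List.foldl_append,
    List.any_cons, List.any_nil, Bool.or_false]
  split_ifs with h0 h1 ha hb h2 h2e h3 h3e h4
  · rw [fold_win d 0 "deny_telemetry" pvG0 (by decide) (by simp_all [pvG0]) "deny_other"]
    rw [fold_const d 0 "deny_telemetry" pvG1 (by decide)]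
    rw [fold_const d 0 "deny_telemetry" pvG2 (by decide)]
    rw [fold_const d 0 "deny_telemetry" pvG3 (by decide)]
    rw [fold_const d 0 "deny_telemetry" pvG4 (by decide)]
    rw [fold_const d 0 "deny_telemetry" pvG5 (by decide)]
    rw [fold_const d 0 "deny_telemetry" pvG6 (by decide)]
  · rw [fold_skip d _ pvG0 (by intro e he; fin_cases he <;> simp_all)]
    rw [fold_win d 1 "deny_telemetry" pvG1 (by decide) (by simp_all [pvG1]) "deny_other"]
    rw [fold_const d 1 "deny_telemetry" pvG2 (by decide)]
    rw [fold_const d 1 "deny_telemetry" pvG3 (by decide)]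
    rw [fold_const d 1 "deny_telemetry" pvG4 (by decide)]
    rw [fold_const d 1 "deny_telemetry" pvG5 (by decide)]
    rw [fold_const d 1 "deny_telemetry" pvG6 (by decide)]
  · rw [fold_skip d _ pvG0 (by intro e he; fin_cases he <;> simp_all)]
    rw [fold_win d 1 "deny_telemetry" pvG1 (by decide) (by simp_all [pvG1]) "deny_other"]
    rw [fold_const d 1 "deny_telemetry" pvG2 (by decide)]
    rw [fold_const d 1 "deny_telemetry" pvG3 (by decide)]
    rw [fold_const d 1 "deny_telemetry" pvG4 (by decide)]
    rw [fold_const d 1 "deny_telemetry" pvG5 (by decide)]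
    rw [fold_const d 1 "deny_telemetry" pvG6 (by decide)]
  · rw [fold_skip d _ pvG0 (by intro e he; fin_cases he <;> simp_all)]
    rw [fold_win d 1 "deny_telemetry" pvG1 (by decide) (by simp_all [pvG1]) "deny_other"]
    rw [fold_const d 1 "deny_telemetry" pvG2 (by decide)]
    rw [fold_const d 1 "deny_telemetry" pvG3 (by decide)]
    rw [fold_const d 1 "deny_telemetry" pvG4 (by decide)]
    rw [fold_const d 1 "deny_telemetry" pvG5 (by decide)]
    rw [fold_const d 1 "deny_telemetry" pvG6 (by decide)]
  · rw [fold_skip d _ pvG0 (by intro e he; fin_cases he <;> simp_all)]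
    rw [fold_skip d _ pvG1 (by intro e he; fin_cases he <;> simp_all)]
    rw [fold_win d 2 "social_core" pvG2 (by decide) (by simp_all [pvG2]) "deny_other"]
    rw [fold_const d 2 "social_core" pvG3 (by decide)]
    rw [fold_const d 2 "social_core" pvG4 (by decide)]
    rw [fold_const d 2 "social_core" pvG5 (by decide)]
    rw [fold_const d 2 "social_core" pvG6 (by decide)]
  · rw [fold_skip d _ pvG0 (by intro e he; fin_cases he <;> simp_all)]
    rw [fold_skip d _ pvG1 (by intro e he; fin_cases he <;> simp_all)]
    rw [fold_skip d _ pvG2 (by intro e he; fin_cases he <;> simp_all)]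
    rw [fold_win d 3 "deny_meta" pvG3 (by decide) (by simp_all [pvG3]) "deny_other"]
    rw [fold_const d 3 "deny_meta" pvG4 (by decide)]
    rw [fold_const d 3 "deny_meta" pvG5 (by decide)]
    rw [fold_const d 3 "deny_meta" pvG6 (by decide)]
  · rw [fold_skip d _ pvG0 (by intro e he; fin_cases he <;> simp_all)]
    rw [fold_skip d _ pvG1 (by intro e he; fin_cases he <;> simp_all)]
    rw [fold_skip d _ pvG2 (by intro e he; fin_cases he <;> simp_all [pv_graph_false, pv_web_false, pv_insta_false])]
    rw [fold_skip d _ pvG3 (by intro e he; fin_cases he <;> simp_all)]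
    rw [fold_win d 4 "deny_oem" pvG4 (by decide) (by simp_all [pvG4]) "deny_other"]
    rw [fold_const d 4 "deny_oem" pvG5 (by decide)]
    rw [fold_const d 4 "deny_oem" pvG6 (by decide)]
  · rw [fold_skip d _ pvG0 (by intro e he; fin_cases he <;> simp_all)]
    rw [fold_skip d _ pvG1 (by intro e he; fin_cases he <;> simp_all)]
    rw [fold_skip d _ pvG2 (by intro e he; fin_cases he <;> simp_all [pv_graph_false, pv_web_false, pv_insta_false])]
    rw [fold_skip d _ pvG3 (by intro e he; fin_cases he <;> simp_all)]
    rw [fold_skip d _ pvG4 (by intro e he; fin_cases he <;> simp_all)]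
    rw [fold_win d 5 "samsung_services" pvG5 (by decide) (by simp_all [pvG5]) "deny_other"]
    rw [fold_const d 5 "samsung_services" pvG6 (by decide)]
  · rw [fold_skip d _ pvG0 (by intro e he; fin_cases he <;> simp_all)]
    rw [fold_skip d _ pvG1 (by intro e he; fin_cases he <;> simp_all)]
    rw [fold_skip d _ pvG2 (by intro e he; fin_cases he <;> simp_all [pv_graph_false, pv_web_false, pv_insta_false])]
    rw [fold_skip d _ pvG3 (by intro e he; fin_cases he <;> simp_all)]
    rw [fold_skip d _ pvG4 (by intro e he; fin_cases he <;> simp_all [pv_samsungdm_false])]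
    rw [fold_skip d _ pvG5 (by intro e he; fin_cases he <;> simp_all)]
    rw [fold_win d 6 "deny_ads" pvG6 (by decide) (by simp_all [pvG6]) "deny_other"]
  · rw [fold_skip d _ pvG0 (by intro e he; fin_cases he <;> simp_all)]
    rw [fold_skip d _ pvG1 (by intro e he; fin_cases he <;> simp_all)]
    rw [fold_skip d _ pvG2 (by intro e he; fin_cases he <;> simp_all [pv_graph_false, pv_web_false, pv_insta_false])]
    rw [fold_skip d _ pvG3 (by intro e he; fin_cases he <;> simp_all)]
    rw [fold_skip d _ pvG4 (by intro e he; fin_cases he <;> simp_all [pv_samsungdm_false])]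
    rw [fold_skip d _ pvG5 (by intro e he; fin_cases he <;> simp_all)]
    rw [fold_skip d _ pvG6 (by intro e he; fin_cases he <;> simp_all)]
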